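-- pv_equiv track=rewrite | github.com/tuhanren/COMP214-Database-PL-SQL | Seneca/pathToMLJob/Developer_Basics/python/lstDictLoop.py | f
-- ===== SOURCE A (Python) =====
-- from typing import List, Dict, TextIO
-- from typing import List, Callable
-- from typing import List
-- from typing import List
-- from typing import Dict, List
--
-- def f(n: int, m: int) -> List[int]:
--     result = []
--     for i in range(n):
--         for j in range(n + m):
--             if (j % 2 == 0):
--                 result.append(1)
--             elif (i % 2 == 0):
--                 result.append(2)
--             else:
--                 result.append(0)
--     return result
-- ===== SOURCE B (Python) =====
-- def f(n: int, m: int):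
--     if n <= 0:
--         return []
--     even_row = [1 if j % 2 == 0 else 2 for j in range(n + m)]
--     odd_row = [1 if j % 2 == 0 else 0 for j in range(n + m)]
--     result = []
--     for i in range(n):
--         result.extend(even_row if i % 2 == 0 else odd_row)
--     return result
-- ===== Notes on version B (the rewrite author's own statement) =====
-- stated objective: simpler
-- what changed: The inner j-loop with its per-element three-way conditional is replaced by two row templates computed once (even_row/odd_row); the loop over i just extends the result with the whole prebuilt row.
import Mathlib
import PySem

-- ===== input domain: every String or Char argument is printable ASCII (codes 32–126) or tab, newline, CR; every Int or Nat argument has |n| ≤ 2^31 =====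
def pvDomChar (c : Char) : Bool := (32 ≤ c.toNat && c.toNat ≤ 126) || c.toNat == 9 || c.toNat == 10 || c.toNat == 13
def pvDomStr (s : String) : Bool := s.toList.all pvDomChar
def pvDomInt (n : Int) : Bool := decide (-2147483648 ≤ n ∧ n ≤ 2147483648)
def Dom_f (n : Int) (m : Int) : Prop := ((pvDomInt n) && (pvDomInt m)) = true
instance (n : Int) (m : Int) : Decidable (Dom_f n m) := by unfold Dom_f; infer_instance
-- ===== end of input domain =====

-- B precomputes the two possible parity rows once and extends the result with a whole row per i (objective: simpler).


-- ===== PORT A =====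
def f (n : Int) (m : Int) : List Int :=
  (PySem.List.pyRange 0 n 1).foldl (fun result i =>
    (PySem.List.pyRange 0 (n + m) 1).foldl (fun r j =>
      if PySem.Int.mod j 2 == 0 then r ++ [1]
      else if PySem.Int.mod i 2 == 0 then r ++ [2]
      else r ++ [0]) result) []

-- ===== PORT B =====
def f_alt (n : Int) (m : Int) : List Int :=
  if n ≤ 0 then [] else
  let even_row := (PySem.List.pyRange 0 (n + m) 1).map
    (fun j => if PySem.Int.mod j 2 == 0 then (1 : Int) else 2)
  let odd_row := (PySem.List.pyRange 0 (n + m) 1).map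
    (fun j => if PySem.Int.mod j 2 == 0 then (1 : Int) else 0)
  (PySem.List.pyRange 0 n 1).foldl (fun result i =>
    result ++ (if PySem.Int.mod i 2 == 0 then even_row else odd_row)) []

-- ===== PRECONDITION & SPEC =====
def Spec_f (n : Int) (m : Int) (out : List Int) : Prop := out = f_alt n m
instance (n : Int) (m : Int) (out : List Int) : Decidable (Spec_f n m out) := by unfold Spec_f; infer_instance

-- ===== CLAIM (what is proved, stated in full; the proofs are below) =====
def Claim_equal_f : Prop := ∀ (n : Int) (m : Int), Dom_f n m → Spec_f n m (f n m)

-- ===== LEMMAS AND PROOFS =====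

-- the inner append-one-element loop is acc ++ map
theorem foldl_append_one {α β : Type} (g : β → α) (l : List β) (acc : List α) :
    l.foldl (fun r x => r ++ [g x]) acc = acc ++ l.map g := by
  induction l generalizing acc with
  | nil => simp
  | cons x xs ih => simp [List.foldl, ih, List.append_assoc]

theorem inner_eq (n m i : Int) (acc : List Int) :
    (PySem.List.pyRange 0 (n + m) 1).foldl (fun r j =>
      if PySem.Int.mod j 2 == 0 then r ++ [1]
      else if PySem.Int.mod i 2 == 0 then r ++ [2]
      else r ++ [0]) acc
    = acc ++ (if PySem.Int.mod i 2 == 0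
        then (PySem.List.pyRange 0 (n + m) 1).map
          (fun j => if PySem.Int.mod j 2 == 0 then (1 : Int) else 2)
        else (PySem.List.pyRange 0 (n + m) 1).map
          (fun j => if PySem.Int.mod j 2 == 0 then (1 : Int) else 0)) := by
  by_cases h : PySem.Int.mod i 2 == 0 <;>
    simp only [h, if_true, if_false, Bool.false_eq_true] <;>
    [rw [← foldl_append_one (fun j => if PySem.Int.mod j 2 == 0 then (1 : Int) else 2)];
     rw [← foldl_append_one (fun j => if PySem.Int.mod j 2 == 0 then (1 : Int) else 0)]] <;>
    · apply PySem.List.foldl_congr_mem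
      intro r j _
      split <;> simp

theorem f_spec' (n m : Int) : f n m = f_alt n m := by
  unfold f f_alt
  by_cases hn : n ≤ 0
  · simp [hn, PySem.List.pyRange_one, show (n - 0).toNat = 0 by omega]
  · simp only [hn, if_false]
    apply PySem.List.foldl_congr_mem
    intro acc i _
    exact inner_eq n m i acc

-- ===== VERDICT (by name: the statement is the Claim_ definition above) =====
theorem f_spec : Claim_equal_f := by
  intro n m _
  unfold Spec_f
  exact f_spec' n m
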